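-- pv_equiv track=rewrite | github.com/bcvalley/LoLGameAssistant | test_algo.py | best_champion
-- ===== SOURCE A (Python) =====
-- def best_champion(lst):
--     winrate = {}
--     ## has to find the champion with most wins
--     for each in lst:
--         if each[0] not in winrate:
--             if each[1] == True:
--                 winrate[each[0]] = (1,1)
--             else:
--                 winrate[each[0]] = (0,1)
--         else:
--             if each[1] == True:
--                 winrate[each[0]] = (winrate[each[0]][0]+1,winrate[each[0]][1]+1)
--             else:
--                 winrate[each[0]] = (winrate[each[0]][0],winrate[each[0]][1]+1)
--     return winrate
-- ===== SOURCE B (Python) =====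
-- def best_champion(lst):
--     games = {}
--     for c, _ in lst:
--         games[c] = games.get(c, 0) + 1
--     wins = {}
--     for c, w in lst:
--         if w == True:
--             wins[c] = wins.get(c, 0) + 1
--     return {c: (wins.get(c, 0), g) for c, g in games.items()}
-- ===== Notes on version B (the rewrite author's own statement) =====
-- stated objective: idiomatic
-- what changed: A interleaves wins and games in one dict of pairs with a membership branch per element; B makes two independent counting passes (games per champion, wins per champion) and combines the two tables in a final comprehension keyed by first-appearance order.
import Mathlib
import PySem

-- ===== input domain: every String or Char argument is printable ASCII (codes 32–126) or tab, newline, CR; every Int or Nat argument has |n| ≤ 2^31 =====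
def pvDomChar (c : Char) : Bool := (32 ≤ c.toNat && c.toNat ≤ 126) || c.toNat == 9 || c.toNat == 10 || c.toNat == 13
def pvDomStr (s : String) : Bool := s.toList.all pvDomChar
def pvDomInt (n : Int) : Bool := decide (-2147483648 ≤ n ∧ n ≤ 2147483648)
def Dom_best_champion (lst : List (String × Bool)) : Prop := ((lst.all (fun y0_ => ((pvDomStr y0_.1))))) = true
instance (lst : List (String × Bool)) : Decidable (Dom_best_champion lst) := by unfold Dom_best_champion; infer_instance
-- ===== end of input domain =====

-- B replaces A's single interleaved accumulation into a dict of (wins, games) pairs by two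
-- independent counting passes plus a combining comprehension (idiomatic decomposition; same cost).

-- ===== PORT A =====
def best_champion (lst : List (String × Bool)) : List (String × Int × Int) :=
  let winrate : PySem.Dict String (Int × Int) :=
    lst.foldl (fun winrate each =>
      if winrate.contains each.1 = false then
        if each.2 == true then winrate.insert each.1 ((1 : Int), (1 : Int))
        else winrate.insert each.1 ((0 : Int), (1 : Int))
      else
        -- winrate[each.1] exists here; getD with a junk default is exact
        if each.2 == true then
          winrate.insert each.1 ((winrate.getD each.1 (0, 0)).1 + 1, (winrate.getD each.1 (0, 0)).2 + 1)
        else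
          winrate.insert each.1 ((winrate.getD each.1 (0, 0)).1, (winrate.getD each.1 (0, 0)).2 + 1))
      PySem.Dict.empty
  winrate.items

-- ===== PORT B =====
def best_champion_alt (lst : List (String × Bool)) : List (String × Int × Int) :=
  let games : PySem.Dict String Int :=
    lst.foldl (fun d p => d.insert p.1 (d.getD p.1 0 + 1)) PySem.Dict.empty
  let wins : PySem.Dict String Int :=
    lst.foldl (fun d p => if p.2 == true then d.insert p.1 (d.getD p.1 0 + 1) else d) PySem.Dict.empty
  games.items.map (fun p => (p.1, (wins.getD p.1 0, p.2)))

-- ===== PRECONDITION & SPEC =====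
def Spec_best_champion (lst : List (String × Bool)) (out : List (String × Int × Int)) : Prop := out = best_champion_alt lst
instance (lst : List (String × Bool)) (out : List (String × Int × Int)) : Decidable (Spec_best_champion lst out) := by unfold Spec_best_champion; infer_instance

-- ===== CLAIM (what is proved, stated in full; the proofs are below) =====
def Claim_equal_best_champion : Prop := ∀ (lst : List (String × Bool)), Dom_best_champion lst → Spec_best_champion lst (best_champion lst)

-- ===== LEMMAS AND PROOFS =====

-- A's accumulator, named for the proofs
def stepA (d : PySem.Dict String (Int × Int)) (each : String × Bool) : PySem.Dict String (Int × Int) :=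
  if d.contains each.1 = false then
    if each.2 == true then d.insert each.1 ((1 : Int), (1 : Int))
    else d.insert each.1 ((0 : Int), (1 : Int))
  else
    if each.2 == true then
      d.insert each.1 ((d.getD each.1 (0, 0)).1 + 1, (d.getD each.1 (0, 0)).2 + 1)
    else
      d.insert each.1 ((d.getD each.1 (0, 0)).1, (d.getD each.1 (0, 0)).2 + 1)

def dA (l : List (String × Bool)) : PySem.Dict String (Int × Int) := l.foldl stepA PySem.Dict.empty

def gcount (l : List (String × Bool)) (c : String) : Int := ((l.map Prod.fst).count c : Int)
def wcount (l : List (String × Bool)) (c : String) : Int :=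
  (((l.filter (fun p => p.2 == true)).map Prod.fst).count c : Int)

lemma stepA_eq_insert : stepA = fun d each => d.insert each.1
    (if d.contains each.1 = false then (if each.2 == true then ((1 : Int), (1 : Int)) else (0, 1))
     else if each.2 == true then ((d.getD each.1 (0, 0)).1 + 1, (d.getD each.1 (0, 0)).2 + 1)
     else ((d.getD each.1 (0, 0)).1, (d.getD each.1 (0, 0)).2 + 1)) := by
  funext d each
  unfold stepA
  split_ifs <;> rfl

lemma keys_dA (l : List (String × Bool)) : (dA l).keys = PySem.Set.ofList (l.map Prod.fst) := by
  unfold dA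
  rw [stepA_eq_insert, PySem.Dict.keys_foldl_insert_key]
  simp [PySem.Set.update_nil_left]

lemma nodup_keys_dA (l : List (String × Bool)) : (dA l).keys.Nodup := by
  rw [keys_dA]; exact PySem.Set.nodup_ofList _

lemma contains_dA (l : List (String × Bool)) (c : String) :
    (dA l).contains c = decide (c ∈ l.map Prod.fst) := by
  rw [PySem.Dict.contains_eq_decide_mem_keys, keys_dA]
  simp [PySem.Set.mem_ofList]

lemma getD_dA (l : List (String × Bool)) (c : String) (h : c ∈ l.map Prod.fst) :
    (dA l).getD c (0, 0) = (wcount l c, gcount l c) := by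
  induction l using List.reverseRecOn with
  | nil => simp at h
  | append_singleton l x ih =>
    obtain ⟨a, w⟩ := x
    have hfold : dA (l ++ [(a, w)]) = stepA (dA l) (a, w) := by
      unfold dA; rw [List.foldl_append]; rfl
    by_cases hc : c = a
    · subst hc
      by_cases hmem : c ∈ l.map Prod.fst
      · have hcontains : (dA l).contains c = true := by rw [contains_dA]; simpa using hmem
        cases w <;>
          simp [hfold, stepA, hcontains, PySem.Dict.getD_insert_self, ih hmem, wcount, gcount,
            List.filter_append, List.count_append]
      · have hcontains : (dA l).contains c = false := by rw [contains_dA]; simpa using hmem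
        have hg0 : (l.map Prod.fst).count c = 0 := List.count_eq_zero.2 hmem
        have hw0 : ((l.filter (fun p => p.2)).map Prod.fst).count c = 0 := by
          refine List.count_eq_zero.2 (fun hmm => hmem ?_)
          rcases List.mem_map.1 hmm with ⟨p, hp, hpe⟩
          exact List.mem_map.2 ⟨p, List.mem_of_mem_filter hp, hpe⟩
        cases w <;>
          simp [hfold, stepA, hcontains, PySem.Dict.getD_insert_self, wcount, gcount,
            List.filter_append, List.count_append, hg0, hw0]
    · have hmem : c ∈ l.map Prod.fst := by
        rcases List.mem_map.1 h with ⟨p, hp, hpe⟩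
        rcases List.mem_append.1 hp with hp' | hp'
        · exact List.mem_map.2 ⟨p, hp', hpe⟩
        · exfalso; apply hc; simp at hp'; rw [← hpe, hp']
      rw [hfold]
      have hstep : (stepA (dA l) (a, w)).getD c (0, 0) = (dA l).getD c (0, 0) := by
        unfold stepA
        split_ifs <;> simp [PySem.Dict.getD_insert, hc]
      rw [hstep, ih hmem]
      unfold wcount gcount
      cases w <;>
        simp [List.filter_append, List.count_append, Ne.symm hc]

lemma items_dA (l : List (String × Bool)) :
    (dA l).items = (PySem.Set.ofList (l.map Prod.fst)).map (fun k => (k, (wcount l k, gcount l k))) := by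
  rw [PySem.Dict.items_eq_map_keys (dA l) (nodup_keys_dA l) (0, 0), keys_dA]
  refine List.map_congr_left (fun k hk => ?_)
  rw [getD_dA l k ((PySem.Set.mem_ofList _ _).1 hk)]

lemma games_eq_counter (l : List (String × Bool)) :
    l.foldl (fun d p => d.insert p.1 (d.getD p.1 0 + 1)) PySem.Dict.empty
      = PySem.Dict.counter (l.map Prod.fst) := by
  rw [← PySem.Dict.foldl_insert_getD_add_one_eq_counter, List.foldl_map]

lemma wins_eq_counter (l : List (String × Bool)) :
    l.foldl (fun d p => if p.2 == true then d.insert p.1 (d.getD p.1 0 + 1) else d) PySem.Dict.empty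
      = PySem.Dict.counter ((l.filter (fun p => p.2 == true)).map Prod.fst) := by
  rw [← PySem.Dict.foldl_insert_getD_add_one_eq_counter, List.foldl_map, List.foldl_filter]

lemma alt_items (l : List (String × Bool)) :
    best_champion_alt l
      = (PySem.Set.ofList (l.map Prod.fst)).map (fun k => (k, (wcount l k, gcount l k))) := by
  simp only [best_champion_alt, games_eq_counter, wins_eq_counter, PySem.Dict.items_counter,
    List.map_map]
  refine List.map_congr_left (fun k _ => ?_)
  simp [PySem.Dict.getD_counter, wcount, gcount]

-- ===== VERDICT (by name: the statement is the Claim_ definition above) =====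
theorem best_champion_spec : Claim_equal_best_champion := by
  intro lst _
  show best_champion lst = best_champion_alt lst
  have hA : best_champion lst = (dA lst).items := rfl
  rw [hA, items_dA, alt_items]
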